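-- pv_equiv track=rewrite | github.com/EHotwagner/HighBarV3 | clients/python/highbar_client/behavioral_coverage/audit_runner.py | _rpc_row_id
-- ===== SOURCE A (Python) =====
-- def _rpc_row_id(name: str) -> str:
--     parts: list[str] = []
--     current: list[str] = []
--     for char in name:
--         if char.isupper() and current:
--             parts.append("".join(current).lower())
--             current = [char]
--         else:
--             current.append(char)
--     if current:
--         parts.append("".join(current).lower())
--     return "rpc-" + "-".join(parts)
-- ===== SOURCE B (Python) =====
-- def _rpc_row_id(name: str) -> str:
--     n = len(name)
--     bounds = [0] + [i for i in range(1, n) if name[i].isupper()]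
--     ends = bounds[1:] + [n]
--     parts = [name[a:b].lower() for a, b in zip(bounds, ends)]
--     return "rpc-" + "-".join(parts)
-- ===== Notes on version B (the rewrite author's own statement) =====
-- stated objective: alternative
-- what changed: Replaces A's streaming accumulate-into-current/flush-on-uppercase loop with a two-pass index-table approach: first collect boundary indices (0 plus every later position holding an uppercase char), then slice the name between consecutive boundaries and lowercase each slice.
import Mathlib
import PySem

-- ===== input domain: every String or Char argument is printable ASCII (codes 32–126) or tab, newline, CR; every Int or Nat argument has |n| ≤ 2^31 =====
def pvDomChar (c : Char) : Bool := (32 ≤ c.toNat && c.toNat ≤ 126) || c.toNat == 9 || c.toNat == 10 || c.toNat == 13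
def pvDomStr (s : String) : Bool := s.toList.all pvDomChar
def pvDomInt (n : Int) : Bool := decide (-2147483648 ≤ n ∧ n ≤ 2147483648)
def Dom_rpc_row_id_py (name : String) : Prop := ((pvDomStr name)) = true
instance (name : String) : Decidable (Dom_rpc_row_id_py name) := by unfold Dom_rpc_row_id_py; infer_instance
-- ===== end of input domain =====

-- B replaces A's streaming accumulate/flush loop by an index-table pass (boundary
-- indices 0 plus each later uppercase position) followed by a slicing pass (objective: alternative).

-- ===== PORT A =====
-- streaming loop: state = (finished parts, current group); flush on an uppercase char
def rpc_row_id_py (name : String) : String :=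
  let st := name.toList.foldl
    (fun (st : List (List Char) × List Char) c =>
      if PySem.Chars.isupper c && !st.2.isEmpty then
        (st.1 ++ [PySem.Chars.lower st.2], [c])
      else
        (st.1, st.2 ++ [c]))
    ([], [])
  let parts := if !st.2.isEmpty then st.1 ++ [PySem.Chars.lower st.2] else st.1
  String.ofList ("rpc-".toList ++ PySem.Chars.join ['-'] parts)

-- ===== PORT B =====
-- boundary indices, then slices between consecutive boundaries
def rpc_row_id_py_alt (name : String) : String :=
  let xs := name.toList
  let n : Int := PySem.Chars.len xs
  let bounds : List Int :=
    0 :: (PySem.List.pyRange 1 n 1).filter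
      (fun i => ((PySem.Chars.pyGet? xs i).map PySem.Chars.isupper).getD false)
  let ends := bounds.drop 1 ++ [n]
  let parts := (bounds.zip ends).map
      (fun ab => PySem.Chars.lower (PySem.Chars.slice xs (some ab.1) (some ab.2)))
  String.ofList ("rpc-".toList ++ PySem.Chars.join ['-'] parts)

-- ===== PRECONDITION & SPEC =====
def Spec_rpc_row_id_py (name : String) (out : String) : Prop := out = rpc_row_id_py_alt name
instance (name : String) (out : String) : Decidable (Spec_rpc_row_id_py name out) := by unfold Spec_rpc_row_id_py; infer_instance

-- ===== CLAIM (what is proved, stated in full; the proofs are below) =====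
def Claim_equal_rpc_row_id_py : Prop := ∀ (name : String), Dom_rpc_row_id_py name → Spec_rpc_row_id_py name (rpc_row_id_py name)

-- ===== LEMMAS AND PROOFS =====

-- the grouping both programs compute: groups of a NONEMPTY suffix, given a nonempty current group
def pvGroups (cur : List Char) : List Char → List (List Char)
  | [] => [cur]
  | c :: t => if PySem.Chars.isupper c then cur :: pvGroups [c] t else pvGroups (cur ++ [c]) t

-- B's parts, written as a recursion over the tail of the boundary list
def pvBParts (xs : List Char) (n : Int) : Int → List Int → List (List Char)
  | a, [] => [PySem.Chars.lower (PySem.Chars.slice xs (some a) (some n))]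
  | a, b :: t => PySem.Chars.lower (PySem.Chars.slice xs (some a) (some b)) :: pvBParts xs n b t

theorem pvZip_eq_bparts (xs : List Char) (n : Int) :
    ∀ (rest : List Int) (a : Int),
      ((a :: rest).zip ((a :: rest).drop 1 ++ [n])).map
        (fun ab => PySem.Chars.lower (PySem.Chars.slice xs (some ab.1) (some ab.2)))
      = pvBParts xs n a rest := by
  intro rest
  induction rest with
  | nil => intro a; simp [pvBParts]
  | cons b t ih => intro a; simpa [pvBParts] using ih b

theorem pvA_loop :
    ∀ (l : List Char) (parts : List (List Char)) (cur : List Char), cur ≠ [] →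
      (let st := l.foldl
        (fun (st : List (List Char) × List Char) c =>
          if PySem.Chars.isupper c && !st.2.isEmpty then
            (st.1 ++ [PySem.Chars.lower st.2], [c])
          else
            (st.1, st.2 ++ [c])) (parts, cur)
       if !st.2.isEmpty then st.1 ++ [PySem.Chars.lower st.2] else st.1)
      = parts ++ (pvGroups cur l).map PySem.Chars.lower := by
  intro l
  induction l with
  | nil =>
    intro parts cur h
    simp [pvGroups, h]
  | cons c t ih =>
    intro parts cur h
    have hne : cur.isEmpty = false := by simp [h]
    by_cases hu : PySem.Chars.isupper c = true
    · simp only [List.foldl_cons, hu, hne]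
      simpa [pvGroups, hu] using ih (parts ++ [PySem.Chars.lower cur]) [c] (List.cons_ne_nil c [])
    · simp only [List.foldl_cons, Bool.not_eq_true] at hu ⊢
      simp only [hu, Bool.false_and, Bool.false_eq_true, if_false]
      simpa [pvGroups, hu] using ih parts (cur ++ [c]) (by simp)

theorem pvB_loop (xs : List Char) :
    ∀ (l : List Char) (k : Nat) (cur : List Char),
      xs.drop k = l → cur ≠ [] → cur.length ≤ k →
      (xs.drop (k - cur.length)).take cur.length = cur →
      pvBParts xs xs.length ((k : Int) - cur.length)
        ((PySem.List.pyRange k xs.length 1).filter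
          (fun i => ((PySem.Chars.pyGet? xs i).map PySem.Chars.isupper).getD false))
      = (pvGroups cur l).map PySem.Chars.lower := by
  intro l
  induction l with
  | nil =>
    intro k cur hdrop hne hle htake
    have hnk : xs.length ≤ k := by
      have := List.drop_eq_nil_iff.mp hdrop
      omega
    rw [PySem.List.pyRange_one_eq_nil (by exact_mod_cast hnk)]
    have ha : (k : Int) - cur.length = ((k - cur.length : Nat) : Int) := by omega
    simp only [List.filter_nil, pvBParts, pvGroups, List.map_cons, List.map_nil, ha]
    have hslice : PySem.Chars.slice xs (some ((k - cur.length : Nat) : Int)) (some (xs.length : Int))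
        = (xs.drop (k - cur.length)).take (xs.length - (k - cur.length)) := by
      simpa using PySem.List.slice_natCast xs (k - cur.length) xs.length
    have hlen : (xs.drop (k - cur.length)).length ≤ xs.length - (k - cur.length) := by
      simp
    have hlen' : (xs.drop (k - cur.length)).length ≤ cur.length := by
      have := congrArg List.length htake
      simp at this
      omega
    have hcur : cur = xs.drop (k - cur.length) := by
      conv_lhs => rw [← htake]
      rw [List.take_of_length_le hlen']
    have hfin : (xs.drop (k - cur.length)).take (xs.length - (k - cur.length)) = cur := by
      rw [List.take_of_length_le hlen]
      exact hcur.symm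
    rw [hslice, hfin]
  | cons c t ih =>
    intro k cur hdrop hne hle htake
    have hk : k < xs.length := by
      by_contra h
      rw [List.drop_eq_nil_iff.mpr (by omega)] at hdrop
      exact (List.cons_ne_nil c t) hdrop.symm
    have hget : xs[k]? = some c := by
      have : (xs.drop k)[0]? = some c := by rw [hdrop]; rfl
      simpa using this
    rw [PySem.List.pyRange_one_cons (by exact_mod_cast hk), List.filter_cons]
    simp only [PySem.Chars.pyGet?_eq_listPyGet?, PySem.List.pyGet?_natCast, hget,
      Option.map_some, Option.getD_some]
    have hdropk1 : xs.drop (k + 1) = t := by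
      have : (xs.drop k).drop 1 = t := by rw [hdrop]; rfl
      simpa [List.drop_drop, Nat.add_comm] using this
    by_cases hu : PySem.Chars.isupper c = true
    · rw [if_pos hu]
      have hslice : PySem.Chars.slice xs (some ((k : Int) - cur.length)) (some (k : Int)) = cur := by
        have ha : (k : Int) - cur.length = ((k - cur.length : Nat) : Int) := by omega
        rw [ha]
        have := PySem.List.slice_natCast xs (k - cur.length) k
        have hk' : k - (k - cur.length) = cur.length := by omega
        simp only [PySem.Chars.slice_eq_listSlice, this, hk', htake]
      have htake1 : (xs.drop ((k + 1) - ([c] : List Char).length)).take ([c] : List Char).length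
          = [c] := by
        simp only [List.length_cons, List.length_nil, Nat.add_sub_cancel]
        rw [List.take_add_one, List.take_zero, List.getElem?_drop]
        simp [hget]
      have ihres := ih (k + 1) [c] hdropk1 (by simp) (by simp) htake1
      simp only [pvBParts, pvGroups, hu, if_true, List.map_cons, hslice]
      congr 1
      simp only [PySem.Chars.pyGet?_eq_listPyGet?] at ihres
      have e2 : (k : Int) + 1 = ((k + 1 : Nat) : Int) := by push_cast; ring
      have e1 : (k : Int) = ((k + 1 : Nat) : Int) - ((([c] : List Char).length : Nat) : Int) := by
        simp
      rw [e2, e1]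
      exact ihres
    · rw [if_neg hu]
      have hu' : PySem.Chars.isupper c = false := by
        simpa using hu
      have htake' : (xs.drop ((k + 1) - (cur ++ [c]).length)).take (cur ++ [c]).length
          = cur ++ [c] := by
        have h1 : (k + 1) - (cur ++ [c]).length = k - cur.length := by
          simp only [List.length_append, List.length_cons, List.length_nil]
          omega
        rw [h1]
        simp only [List.length_append, List.length_cons, List.length_nil]
        rw [List.take_add_one, htake]
        have : (xs.drop (k - cur.length))[cur.length]? = some c := by
          rw [List.getElem?_drop]
          have h2 : k - cur.length + cur.length = k := by omega
          rw [h2, hget]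
        simp [this]
      have ihres := ih (k + 1) (cur ++ [c]) hdropk1 (by simp)
        (by simp only [List.length_append, List.length_cons, List.length_nil]; omega) htake'
      simp only [pvGroups, hu', Bool.false_eq_true, if_false]
      simp only [PySem.Chars.pyGet?_eq_listPyGet?] at ihres
      have e1 : (k : Int) - (cur.length : Int)
          = ((k + 1 : Nat) : Int) - (((cur ++ [c]).length : Nat) : Int) := by
        simp only [List.length_append, List.length_cons, List.length_nil]
        push_cast
        omega
      have e2 : (k : Int) + 1 = ((k + 1 : Nat) : Int) := by push_cast; ring
      rw [e1, e2]
      exact ihres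

-- ===== VERDICT (by name: the statement is the Claim_ definition above) =====
theorem rpc_row_id_py_spec : Claim_equal_rpc_row_id_py := by
  intro name _
  unfold Spec_rpc_row_id_py rpc_row_id_py rpc_row_id_py_alt
  cases hxs : name.toList with
  | nil =>
    simp [PySem.Chars.len, PySem.List.pyRange_one_eq_nil (by norm_num : (0:Int) ≤ 1),
      PySem.Chars.join_nil, PySem.Chars.join_singleton, PySem.Chars.slice_eq_listSlice,
      PySem.List.slice, PySem.Chars.lower]
  | cons c t =>
    have hA := pvA_loop t [] [c] (by simp)
    have foldstep : (c :: t).foldl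
        (fun (st : List (List Char) × List Char) c =>
          if PySem.Chars.isupper c && !st.2.isEmpty then
            (st.1 ++ [PySem.Chars.lower st.2], [c])
          else
            (st.1, st.2 ++ [c])) ([], [])
        = t.foldl
        (fun (st : List (List Char) × List Char) c =>
          if PySem.Chars.isupper c && !st.2.isEmpty then
            (st.1 ++ [PySem.Chars.lower st.2], [c])
          else
            (st.1, st.2 ++ [c])) ([], [c]) := by
      simp
    have hB := pvB_loop (c :: t) t 1 [c] (by simp) (by simp) (by simp) (by simp)
    have hzip := pvZip_eq_bparts (c :: t) ((c :: t).length : Int)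
      ((PySem.List.pyRange 1 ((c :: t).length : Int) 1).filter
        (fun i => ((PySem.Chars.pyGet? (c :: t) i).map PySem.Chars.isupper).getD false)) 0
    simp only [foldstep, PySem.Chars.len_eq]
    rw [hA, hzip]
    congr 2
    refine congrArg _ ?_
    simpa using hB.symm
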